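-- pv_equiv track=rewrite | github.com/stanislavspbgu/BetaSerpentine | SerpentinesFunctions/print_serpentines_v8.py | PrintArc
-- ===== SOURCE A (Python) =====
-- def PrintArc(arch, F=True, sep=' '):
--     """
--     Returns list of strings which display structure of Arc when printed.
--     arch - amino acids sequence of Arc
--     F - orientation of Arc (see Examples)
--     sep - symbol to fill gaps.
--
--     Input
--     PrintArc('GTY', F = True, sep = ' ')
--
--     Output:
--     'g '
--     '  '
--     ' t'
--     '
--     '  '
--     'y '
--
--     Input
--     PrintArc('GPYG', F = False, sep = ' ')
--
--     Output:
--     ' g'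
--     'p '
--     '  '
--     'y '
--     '  '
--     ' g'
--     """
--     L = len(arch)  # length of Arc
--     strings = []  # empty list for output
--     # dictionary to transform uppercase letters to lowercase
--     dict = {'G': 'g', 'P': 'p', 'A': 'a', 'V': 'v', 'L': 'l', 'I': 'i', 'M': 'm', 'C': 'c', 'F': 'f', 'Y': 'y', 'W': 'w',
--             'H': 'h', 'K': 'k', 'R': 'r', 'Q': 'q', 'N': 'n', 'E': 'e', 'D': 'd', 'S': 's', 'T': 't'}
--     # transform uppercase letters to lowercase
--     seq = ''  # empty string to collect lowercase letters
--     for i in arch: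
--         seq = seq + dict[i]
--
--     # collect strings to print structure of Arcs of different types
--     if L == 3:
--         strings.append(seq[0] + sep)
--         strings.append(sep + sep)
--         strings.append(sep + seq[1])
--         strings.append(sep + sep)
--         strings.append(sep + sep)
--         strings.append(seq[2] + sep)
--
--     elif L == 4:
--         strings.append(seq[0] + sep)
--         strings.append(sep + seq[1])
--         strings.append(2*sep)
--         strings.append(sep + seq[2])
--         strings.append(sep + sep)
--         strings.append(seq[3] + sep)
--
--     elif L == 5:
--         strings.append(seq[0] + sep)
--         strings.append(sep + seq[1])
--         strings.append(sep + seq[2])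
--         strings.append(2*sep)
--         strings.append(sep + seq[3])
--         strings.append(seq[4] + sep)
--
--     elif L == 6:
--         strings.append(seq[0] + sep)
--         strings.append(sep + seq[1])
--         strings.append(sep + seq[2])
--         strings.append(sep + seq[3])
--         strings.append(sep + seq[4])
--         strings.append(seq[5] + sep)
--
--     output = strings
--
--     # flip strings
--     if F == False:
--         stringsR = []
--         for i in strings:
--             stringsR.append(i[::-1])
--         output = stringsR
--     return output
-- ===== SOURCE B (Python) =====
-- _LOWER = {'G': 'g', 'P': 'p', 'A': 'a', 'V': 'v', 'L': 'l', 'I': 'i', 'M': 'm',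
--           'C': 'c', 'F': 'f', 'Y': 'y', 'W': 'w', 'H': 'h', 'K': 'k', 'R': 'r',
--           'Q': 'q', 'N': 'n', 'E': 'e', 'D': 'd', 'S': 's', 'T': 't'}
--
-- # (row, column) of each successive letter in the 6x2 grid, per arc length
-- _POS = {
--     3: [(0, 0), (2, 1), (5, 0)],
--     4: [(0, 0), (1, 1), (3, 1), (5, 0)],
--     5: [(0, 0), (1, 1), (2, 1), (4, 1), (5, 0)],
--     6: [(0, 0), (1, 1), (2, 1), (3, 1), (4, 1), (5, 0)],
-- }
--
-- def PrintArc(arch, F=True, sep=' '):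
--     seq = [_LOWER[c] for c in arch]  # same KeyError behaviour as the original
--     positions = _POS.get(len(seq))
--     if positions is None:
--         return []
--     grid = [[sep, sep] for _ in range(6)]
--     for letter, (r, c) in zip(seq, positions):
--         grid[r][c] = letter
--     rows = [a + b for a, b in grid]
--     if not F:
--         rows = [row[::-1] for row in rows]
--     return rows
-- ===== Notes on version B (the rewrite author's own statement) =====
-- stated objective: simpler
-- what changed: B replaces the four hard-coded per-length branches of appended strings by one 6x2 grid of sep-cells plus a table of (row,col) positions per arc length; letters are placed into the grid and the rows joined, with the same [::-1] column flip.
import Mathlib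
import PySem

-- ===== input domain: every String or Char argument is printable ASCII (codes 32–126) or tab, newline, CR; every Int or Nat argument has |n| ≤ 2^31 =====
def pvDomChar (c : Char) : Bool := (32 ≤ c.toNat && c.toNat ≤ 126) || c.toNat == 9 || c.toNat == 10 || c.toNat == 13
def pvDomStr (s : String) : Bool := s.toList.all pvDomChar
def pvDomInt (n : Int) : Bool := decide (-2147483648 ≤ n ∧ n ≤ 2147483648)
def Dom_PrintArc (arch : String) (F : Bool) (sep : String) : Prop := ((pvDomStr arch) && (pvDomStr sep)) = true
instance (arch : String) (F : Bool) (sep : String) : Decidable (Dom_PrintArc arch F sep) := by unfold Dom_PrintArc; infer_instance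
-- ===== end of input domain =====

-- B builds the six rows from a 6x2 grid of sep-cells and a per-length (row,col) position table
-- instead of A's four hard-coded branches of appended strings (objective: simpler).


-- ===== PORT A =====
-- the uppercase → lowercase dictionary of A (and of B's _LOWER)
def pvLowerDict : PySem.Dict Char Char :=
  PySem.Dict.ofList [('G','g'),('P','p'),('A','a'),('V','v'),('L','l'),('I','i'),('M','m'),('C','c'),
   ('F','f'),('Y','y'),('W','w'),('H','h'),('K','k'),('R','r'),('Q','q'),('N','n'),
   ('E','e'),('D','d'),('S','s'),('T','t')]

def pvLower? (c : Char) : Option Char := PySem.Dict.get? pvLowerDict c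

-- seq[i] as a 1-character string; the none branch is unreachable inside each length branch
def pvGetS (seq : List Char) (i : Int) : String :=
  match PySem.List.pyGet? seq i with
  | some c => String.ofList [c]
  | none => ""

-- i[::-1] (slice with step -1) — cited lemma slice?_none_none_neg_one says this is reverse
def pvRevStr (s : String) : String := (PySem.Str.slice? s none none (-1)).getD ""

def PrintArc (arch : String) (F : Bool) (sep : String) : List String :=
  let L := arch.toList.length
  -- seq = '' ; for i in arch: seq = seq + dict[i]   (KeyError → none; excluded by Pre_)
  let seq? : Option (List Char) :=
    arch.toList.foldl
      (fun acc i =>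
        match acc, pvLower? i with
        | some s, some c => some (s ++ [c])
        | _, _ => none)
      (some [])
  match seq? with
  | none => []   -- KeyError: arbitrary, outside Pre_
  | some seq =>
    let strings : List String :=
      if L = 3 then
        [pvGetS seq 0 ++ sep, sep ++ sep, sep ++ pvGetS seq 1, sep ++ sep, sep ++ sep,
         pvGetS seq 2 ++ sep]
      else if L = 4 then
        [pvGetS seq 0 ++ sep, sep ++ pvGetS seq 1, sep ++ sep, sep ++ pvGetS seq 2,
         sep ++ sep, pvGetS seq 3 ++ sep]   -- 2*sep = sep + sep (exact for the literal 2)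
      else if L = 5 then
        [pvGetS seq 0 ++ sep, sep ++ pvGetS seq 1, sep ++ pvGetS seq 2, sep ++ sep,
         sep ++ pvGetS seq 3, pvGetS seq 4 ++ sep]
      else if L = 6 then
        [pvGetS seq 0 ++ sep, sep ++ pvGetS seq 1, sep ++ pvGetS seq 2, sep ++ pvGetS seq 3,
         sep ++ pvGetS seq 4, pvGetS seq 5 ++ sep]
      else []
    if F == false then strings.map pvRevStr else strings

-- ===== PORT B =====
-- [ _LOWER[c] for c in arch ] : none on KeyError
def pvSeq? : List Char → Option (List Char)
  | [] => some []
  | c :: rest => (pvLower? c).bind fun l => (pvSeq? rest).map fun ls => l :: ls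

-- _POS.get(len(seq))
def pvPosTable (L : Nat) : Option (List (Nat × Nat)) :=
  if L = 3 then some [(0,0),(2,1),(5,0)]
  else if L = 4 then some [(0,0),(1,1),(3,1),(5,0)]
  else if L = 5 then some [(0,0),(1,1),(2,1),(4,1),(5,0)]
  else if L = 6 then some [(0,0),(1,1),(2,1),(3,1),(4,1),(5,0)]
  else none

-- grid[r][c] = v
def pvSetCell (g : List (String × String)) (r c : Nat) (v : String) : List (String × String) :=
  g.modify r (fun p => if c = 0 then (v, p.2) else (p.1, v))

-- the two early returns ([] on KeyError / on a length outside the table) are bind/map/getD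
def PrintArc_alt (arch : String) (F : Bool) (sep : String) : List String :=
  (((pvSeq? arch.toList).bind fun seq =>
    (pvPosTable seq.length).map fun ps =>
      let grid :=
        (seq.zip ps).foldl
          (fun g p => pvSetCell g p.2.1 p.2.2 (String.ofList [p.1]))
          (List.replicate 6 (sep, sep))
      let rows := grid.map (fun p => p.1 ++ p.2)
      if F then rows else rows.map pvRevStr) : Option (List String)).getD []

-- ===== PRECONDITION & SPEC =====
-- Pre_ excludes exactly the arch strings containing a character outside A's 20-key dictionary,
-- on which A raises KeyError.
def Pre_PrintArc (arch : String) (F : Bool) (sep : String) : Prop :=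
  arch.toList.all (fun c => (pvLower? c).isSome) = true
instance (arch : String) (F : Bool) (sep : String) : Decidable (Pre_PrintArc arch F sep) := by
  unfold Pre_PrintArc; infer_instance

def pvWitness_PrintArc : String × Bool × String := ("GTY", true, " ")

def Spec_PrintArc (arch : String) (F : Bool) (sep : String) (out : List String) : Prop :=
  out = PrintArc_alt arch F sep
instance (arch : String) (F : Bool) (sep : String) (out : List String) :
    Decidable (Spec_PrintArc arch F sep out) := by unfold Spec_PrintArc; infer_instance

-- ===== CLAIM (what is proved, stated in full; the proofs are below) =====
def Claim_equal_PrintArc : Prop := ∀ (arch : String) (F : Bool) (sep : String),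
  Dom_PrintArc arch F sep → Pre_PrintArc arch F sep →
  Spec_PrintArc arch F sep (PrintArc arch F sep)

-- ===== LEMMAS AND PROOFS =====

theorem pvFold_none (l : List Char) :
    l.foldl (fun acc i => match acc, pvLower? i with
        | some s, some c => some (s ++ [c])
        | _, _ => none) (none : Option (List Char)) = none := by
  induction l with
  | nil => rfl
  | cons a t ih => simpa using ih

theorem pvFold_some (l : List Char) (acc : List Char) :
    l.foldl (fun acc i => match acc, pvLower? i with
        | some s, some c => some (s ++ [c])
        | _, _ => none) (some acc) = (pvSeq? l).map (fun s => acc ++ s) := by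
  induction l generalizing acc with
  | nil => simp [pvSeq?]
  | cons a t ih =>
    cases h : pvLower? a with
    | none => simp [pvSeq?, h, pvFold_none]
    | some c =>
      cases hs : pvSeq? t with
      | none => simp [pvSeq?, h, hs, ih]
      | some s => simp [pvSeq?, h, hs, ih]

theorem pvSeq?_some (l : List Char) (h : l.all (fun c => (pvLower? c).isSome) = true) :
    ∃ s, pvSeq? l = some s ∧ s.length = l.length := by
  induction l with
  | nil => exact ⟨[], rfl, rfl⟩
  | cons a t ih =>
    simp only [List.all_cons, Bool.and_eq_true] at h
    obtain ⟨s, hs, hlen⟩ := ih h.2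
    obtain ⟨c, hc⟩ := Option.isSome_iff_exists.mp h.1
    exact ⟨c :: s, by simp [pvSeq?, hc, hs], by simp [hlen]⟩

-- (verdict below)
theorem PrintArc_spec : Claim_equal_PrintArc := by
  intro arch F sep _ hpre
  unfold Spec_PrintArc PrintArc PrintArc_alt
  obtain ⟨s, hs, hlen⟩ := pvSeq?_some arch.toList hpre
  rw [pvFold_some, hs, ← hlen]
  simp only [Option.map_some, List.nil_append]
  rcases s with _ | ⟨a, _ | ⟨b, _ | ⟨c, _ | ⟨d, _ | ⟨e, _ | ⟨f, rest⟩⟩⟩⟩⟩⟩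
  · cases F <;> rfl
  · cases F <;> rfl
  · cases F <;> rfl
  · cases F <;> rfl
  · cases F <;> rfl
  · cases F <;> rfl
  · rcases rest with _ | ⟨g, rest⟩
    · cases F <;> rfl
    · -- length ≥ 7: both sides return []
      have h3 : (a::b::c::d::e::f::g::rest).length ≠ 3 := by simp
      have h4 : (a::b::c::d::e::f::g::rest).length ≠ 4 := by simp
      have h5 : (a::b::c::d::e::f::g::rest).length ≠ 5 := by simp
      have h6 : (a::b::c::d::e::f::g::rest).length ≠ 6 := by simp
      simp only [pvPosTable, if_neg h3, if_neg h4, if_neg h5, if_neg h6]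
      cases F <;> simp

-- ===== VERDICT (by name: the statement is the Claim_ definition above) =====
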